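-- pv_equiv track=rewrite | github.com/llimonix/YaMusicBot | bot/utils/tools.py | split_author
-- ===== SOURCE A (Python) =====
-- def split_author(author: str) -> str:
--     elements = author.split(", ")
--
--     new_text = ""
--     for i, element in enumerate(elements):
--         if i % 2 == 0 and i != 0:
--             new_text += "\n"
--         new_text += element
--         if i != len(elements) - 1:
--             new_text += ", "
--
--     return new_text
-- ===== SOURCE B (Python) =====
-- def split_author(author: str) -> str:
--     elements = author.split(", ")
--     pairs = [", ".join(elements[i:i + 2]) for i in range(0, len(elements), 2)]
--     return ", \n".join(pairs)
-- ===== Notes on version B (the rewrite author's own statement) =====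
-- stated objective: simpler
-- what changed: Replaces the per-element indexed loop with parity tests and an append accumulator by two joins: each two-element slice is joined with the comma separator and the resulting pairs are joined with the comma-plus-newline separator.
import Mathlib
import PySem

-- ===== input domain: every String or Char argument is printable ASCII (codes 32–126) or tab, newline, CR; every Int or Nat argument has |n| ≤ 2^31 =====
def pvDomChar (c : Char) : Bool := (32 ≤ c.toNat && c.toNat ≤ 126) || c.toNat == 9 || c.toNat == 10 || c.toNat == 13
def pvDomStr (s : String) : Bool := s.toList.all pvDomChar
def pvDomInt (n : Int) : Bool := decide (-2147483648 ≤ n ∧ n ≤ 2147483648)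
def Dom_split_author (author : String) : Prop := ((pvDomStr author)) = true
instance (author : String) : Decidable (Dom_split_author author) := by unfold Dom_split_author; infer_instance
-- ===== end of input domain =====

-- B replaces A's per-element indexed accumulator loop by two joins over two-element slices (objective: simpler).


-- ===== PORT A =====
-- A's loop body: maybe prepend "\n" (even, nonzero index), append the element, maybe append ", " (not last).
def stepA (n : Int) (acc : String) (ie : Int × String) : String :=
  let acc1 := if ie.1 % 2 == 0 && ie.1 != 0 then acc ++ "\n" else acc
  let acc2 := acc1 ++ ie.2
  if ie.1 != n - 1 then acc2 ++ ", " else acc2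

def split_author (author : String) : String :=
  let elements := (PySem.Str.split? author ", ").getD [author]   -- sep ≠ "", so split? is always some
  (PySem.List.enumerate elements).foldl (stepA (elements.length : Int)) ""

-- ===== PORT B =====
def split_author_alt (author : String) : String :=
  let elements := (PySem.Str.split? author ", ").getD [author]   -- sep ≠ "", so split? is always some
  let pairs := (PySem.List.pyRange 0 (elements.length : Int) 2).map
      (fun i => PySem.Str.join ", " (PySem.List.slice elements (some i) (some (i + 2))))
  PySem.Str.join ", \n" pairs

-- ===== PRECONDITION & SPEC =====
def Spec_split_author (author : String) (out : String) : Prop := out = split_author_alt author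
instance (author : String) (out : String) : Decidable (Spec_split_author author out) := by unfold Spec_split_author; infer_instance

-- ===== CLAIM (what is proved, stated in full; the proofs are below) =====
def Claim_equal_split_author : Prop := ∀ (author : String), Dom_split_author author → Spec_split_author author (split_author author)

-- ===== LEMMAS AND PROOFS =====

-- proof-side chunk descriptions
def pairsL : List String → List String
  | [] => []
  | [a] => [a]
  | a :: b :: t => (a ++ ", " ++ b) :: pairsL t

def restS : List String → String
  | [] => ""
  | [a] => "\n" ++ a
  | a :: b :: t => "\n" ++ a ++ ", " ++ b ++ (if t.isEmpty then "" else ", ") ++ restS t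

lemma sjoin_nil (sep : String) : PySem.Str.join sep [] = "" := by
  apply String.toList_inj.mp
  simp [PySem.Str.toList_join, PySem.Chars.join_nil]

lemma sjoin_singleton (sep a : String) : PySem.Str.join sep [a] = a := by
  apply String.toList_inj.mp
  simp [PySem.Str.toList_join, PySem.Chars.join_singleton]

lemma sjoin_cons_cons (sep p q : String) (rest : List String) :
    PySem.Str.join sep (p :: q :: rest) = p ++ sep ++ PySem.Str.join sep (q :: rest) := by
  apply String.toList_inj.mp
  simp [PySem.Str.toList_join, PySem.Chars.join_cons_cons, String.toList_append]

lemma sep_merge (J : String) : ", " ++ ("\n" ++ J) = ", \n" ++ J := by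
  have e1 : (", " : String).toList = [',', ' '] := by decide
  have e2 : ("\n" : String).toList = ['\n'] := by decide
  have e3 : (", \n" : String).toList = [',', ' ', '\n'] := by decide
  apply String.toList_inj.mp
  simp [String.toList_append, e1, e2, e3]

lemma stepA_eval (n k : Int) (acc a : String) :
    stepA n acc (k, a) =
      (if k % 2 = 0 ∧ k ≠ 0 then acc ++ "\n" else acc) ++ a ++ (if k = n - 1 then "" else ", ") := by
  simp only [stepA]
  have hb1 : ((k % 2 == 0 && k != 0) = true) ↔ (k % 2 = 0 ∧ k ≠ 0) := by simp
  have hb2 : ((k != n - 1) = true) ↔ k ≠ n - 1 := by simp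
  by_cases h12 : k % 2 = 0 ∧ k ≠ 0 <;> by_cases h3 : k = n - 1
  · rw [if_pos (hb1.mpr h12), if_neg (by rw [hb2]; omega), if_pos h12, if_pos h3,
      String.append_empty]
  · rw [if_pos (hb1.mpr h12), if_pos (hb2.mpr h3), if_pos h12, if_neg h3]
  · rw [if_neg (fun hc => h12 (hb1.mp hc)), if_neg (by rw [hb2]; omega), if_neg h12, if_pos h3,
      String.append_empty]
  · rw [if_neg (fun hc => h12 (hb1.mp hc)), if_pos (hb2.mpr h3), if_neg h12, if_neg h3]

lemma pairsL_exists_cons (t : List String) (h : t ≠ []) : ∃ p ps, pairsL t = p :: ps := by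
  match t with
  | [a] => exact ⟨a, [], rfl⟩
  | a :: b :: t' => exact ⟨a ++ ", " ++ b, pairsL t', rfl⟩

lemma restS_eq_join (t : List String) (h : t ≠ []) :
    restS t = "\n" ++ PySem.Str.join ", \n" (pairsL t) := by
  induction t using restS.induct with
  | case1 => exact absurd rfl h
  | case2 a => simp [restS, pairsL, sjoin_singleton]
  | case3 a b t' ih =>
    by_cases ht' : t' = []
    · subst ht'
      simp [restS, pairsL, sjoin_singleton, String.append_assoc]
    · obtain ⟨p, ps, hps⟩ := pairsL_exists_cons t' ht'
      simp only [restS, pairsL, hps, sjoin_cons_cons, List.isEmpty_eq_false_iff.mpr ht',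
        Bool.false_eq_true, if_false]
      rw [ih ht', hps]
      simp [String.append_assoc, sep_merge]

lemma foldA_tail (t : List String) : ∀ (k : Nat) (acc : String), k ≠ 0 → k % 2 = 0 →
    (PySem.List.enumerate t (k : Int)).foldl (stepA ((k : Int) + t.length)) acc
      = acc ++ restS t := by
  induction t using restS.induct with
  | case1 => intro k acc _ _; simp [PySem.List.enumerate_nil, restS]
  | case2 a =>
    intro k acc hk he
    rw [PySem.List.enumerate_cons, PySem.List.enumerate_nil, List.foldl_cons, List.foldl_nil,
      stepA_eval, if_pos (by omega), if_pos (by simp)]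
    simp [restS, String.append_assoc]
  | case3 a b t' ih =>
    intro k acc hk he
    by_cases ht' : t' = []
    · subst ht'
      rw [PySem.List.enumerate_cons, PySem.List.enumerate_cons, PySem.List.enumerate_nil,
        List.foldl_cons, List.foldl_cons, List.foldl_nil,
        stepA_eval _ ((k : Int)) acc a, if_pos (by omega),
        if_neg (by simp only [List.length_cons, List.length_nil]; push_cast; omega),
        stepA_eval _ ((k : Int) + 1), if_neg (by omega),
        if_pos (by simp only [List.length_cons, List.length_nil]; push_cast; omega)]
      simp [restS, String.append_assoc]
    · rw [PySem.List.enumerate_cons, PySem.List.enumerate_cons,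
        List.foldl_cons, List.foldl_cons,
        stepA_eval _ ((k : Int)) acc a, if_pos (by omega),
        if_neg (by simp only [List.length_cons]; push_cast; omega),
        stepA_eval _ ((k : Int) + 1), if_neg (by omega),
        if_neg (by simp only [List.length_cons]; push_cast; have hp : 0 < t'.length := List.length_pos_iff.mpr ht'; omega)]
      have hcast : ((k : Int) + 1 + 1) = ((k + 2 : Nat) : Int) := by push_cast; ring
      have hcast2 : ((k : Int) + ((a :: b :: t' : List String).length : Int))
          = ((k + 2 : Nat) : Int) + (t'.length : Int) := by
        simp only [List.length_cons]; push_cast; ring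
      rw [hcast, hcast2, ih (k + 2) _ (by omega) (by omega)]
      simp only [restS, List.isEmpty_eq_false_iff.mpr ht', Bool.false_eq_true, if_false]
      simp [String.append_assoc]

lemma pyRange_two (n : Nat) :
    PySem.List.pyRange 0 (n : Int) 2 = (List.range ((n + 1) / 2)).map (fun k => ((2 * k : Nat) : Int)) := by
  rw [PySem.List.pyRange_of_pos 0 (n : Int) (by norm_num)]
  by_cases h : 0 < n
  · rw [if_pos (by exact_mod_cast h)]
    have hc : (((n : Int) - 0 + 2 - 1) / 2).toNat = (n + 1) / 2 := by
      have he : ((n : Int) - 0 + 2 - 1) = ((n + 1 : Nat) : Int) := by push_cast; ring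
      rw [he]; omega
    rw [hc]
    apply List.map_congr_left
    intro k _
    push_cast; ring
  · have hn : n = 0 := by omega
    subst hn
    rw [if_neg (by norm_num)]
    simp

lemma chunks_eq (es : List String) :
    (List.range ((es.length + 1) / 2)).map
      (fun k => PySem.Str.join ", " ((es.drop (2 * k)).take 2)) = pairsL es := by
  induction es using pairsL.induct with
  | case1 => simp [pairsL]
  | case2 a => simp [pairsL, sjoin_singleton]
  | case3 a b t ih =>
    have hlen : ((a :: b :: t : List String).length + 1) / 2 = (t.length + 1) / 2 + 1 := by
      simp only [List.length_cons]; omega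
    rw [hlen, List.range_succ_eq_map, List.map_cons, List.map_map]
    simp only [pairsL, List.cons.injEq]
    refine ⟨?_, ?_⟩
    · simp [sjoin_cons_cons, sjoin_singleton]
    · rw [← ih]
      apply List.map_congr_left
      intro k _
      simp only [Function.comp]
      have h2 : 2 * Nat.succ k = (2 * k + 1) + 1 := by omega
      rw [h2, List.drop_succ_cons, List.drop_succ_cons]

lemma pairs_eq (es : List String) :
    (PySem.List.pyRange 0 (es.length : Int) 2).map
      (fun i => PySem.Str.join ", " (PySem.List.slice es (some i) (some (i + 2)))) = pairsL es := by
  rw [pyRange_two, List.map_map, ← chunks_eq es]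
  apply List.map_congr_left
  intro k _
  simp only [Function.comp]
  congr 1
  have h2 : ((2 * k : Nat) : Int) + 2 = ((2 * k : Nat) : Int) + ((2 : Nat) : Int) := by norm_num
  rw [h2, PySem.List.slice_natCast_add]

lemma main_eq (es : List String) :
    (PySem.List.enumerate es).foldl (stepA (es.length : Int)) ""
      = PySem.Str.join ", \n" ((PySem.List.pyRange 0 (es.length : Int) 2).map
          (fun i => PySem.Str.join ", " (PySem.List.slice es (some i) (some (i + 2))))) := by
  rw [pairs_eq]
  match es with
  | [] => simp [PySem.List.enumerate_nil, pairsL, sjoin_nil]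
  | [a] =>
    rw [PySem.List.enumerate_cons, PySem.List.enumerate_nil, List.foldl_cons, List.foldl_nil,
      stepA_eval, if_neg (by omega),
      if_pos (by simp only [List.length_cons, List.length_nil]; push_cast)]
    simp [pairsL, sjoin_singleton]
  | a :: b :: t =>
    rw [PySem.List.enumerate_cons, PySem.List.enumerate_cons, List.foldl_cons, List.foldl_cons,
      stepA_eval _ (0 : Int) "" a, if_neg (by omega),
      if_neg (by simp only [List.length_cons]; push_cast; omega),
      stepA_eval _ ((0 : Int) + 1), if_neg (by omega)]
    by_cases ht : t = []
    · subst ht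
      rw [if_pos (by simp only [List.length_cons, List.length_nil]; push_cast)]
      simp only [PySem.List.enumerate_nil, List.foldl_nil, pairsL]
      rw [sjoin_singleton]
      simp [String.append_assoc]
    · rw [if_neg (by simp only [List.length_cons]; push_cast; have hp : 0 < t.length := List.length_pos_iff.mpr ht; omega)]
      have hcast : ((0 : Int) + 1 + 1) = ((2 : Nat) : Int) := by norm_num
      have hcast2 : (((a :: b :: t : List String).length : Int))
          = ((2 : Nat) : Int) + (t.length : Int) := by
        simp only [List.length_cons]; push_cast; ring
      rw [hcast, hcast2, foldA_tail t 2 _ (by omega) (by omega)]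
      obtain ⟨p, ps, hps⟩ := pairsL_exists_cons t ht
      simp only [pairsL, hps, sjoin_cons_cons]
      rw [restS_eq_join t ht, hps]
      simp [String.append_assoc, sep_merge]

-- ===== VERDICT (by name: the statement is the Claim_ definition above) =====
theorem split_author_spec : Claim_equal_split_author := by
  intro author _
  unfold Spec_split_author split_author split_author_alt
  exact main_eq _
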